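-- pv_equiv track=rewrite | github.com/tongzou/rl-projects | blesfia/Tictactoe/tong-tac-toe.py | trinaryToDecimal
-- ===== SOURCE A (Python) =====
-- def trinaryToDecimal(trinary):
--     decimal = 0
--     i = 0
--     n = 0
--     while(trinary != 0):
--         dec = trinary % 10
--         decimal = decimal + dec * pow(3, i)
--         trinary = trinary//10
--         i += 1
--     return decimal
-- ===== SOURCE B (Python) =====
-- def trinaryToDecimal(trinary):
--     if trinary == 0:
--         return 0
--     return trinary % 10 + 3 * trinaryToDecimal(trinary // 10)
-- ===== Notes on version B (the rewrite author's own statement) =====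
-- stated objective: simpler
-- what changed: B replaces A's iterative loop with mutable accumulator, index counter and per-digit power weighting by a short direct recursion (last digit plus triple of the recursive value on the remaining digits), eliminating the explicit power computation and all loop state.
import Mathlib
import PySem

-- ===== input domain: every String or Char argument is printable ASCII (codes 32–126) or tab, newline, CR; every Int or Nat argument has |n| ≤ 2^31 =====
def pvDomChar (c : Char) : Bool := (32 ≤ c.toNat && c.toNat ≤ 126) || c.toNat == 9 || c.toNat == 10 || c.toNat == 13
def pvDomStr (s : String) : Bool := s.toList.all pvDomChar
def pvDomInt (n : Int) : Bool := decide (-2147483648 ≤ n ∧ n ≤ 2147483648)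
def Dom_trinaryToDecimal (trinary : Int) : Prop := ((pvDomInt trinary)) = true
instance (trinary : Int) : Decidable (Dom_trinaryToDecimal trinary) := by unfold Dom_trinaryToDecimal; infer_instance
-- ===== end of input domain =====

-- B replaces A's indexed accumulator loop with per-digit power weighting by a direct
-- recursion on the remaining digits (simpler decomposition; neither Python returns on negatives).

-- ===== PORT A =====
-- A's while loop: accumulate decimal + digit * 3^i while stripping digits.
-- The `trinary < 0` guard only makes the recursion total: Python diverges there.
def pvLoopA (trinary decimal : Int) (i : Nat) : Int :=
  if trinary = 0 then decimal
  else if trinary < 0 then decimal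
  else pvLoopA (PySem.Int.floordiv trinary 10)
      (decimal + PySem.Int.mod trinary 10 * 3 ^ i) (i + 1)
termination_by trinary.toNat
decreasing_by
  have he : PySem.Int.floordiv trinary 10 = trinary / 10 :=
    PySem.Int.floordiv_eq_ediv_of_pos (by omega)
  rw [he]; omega

def trinaryToDecimal (trinary : Int) : Int := pvLoopA trinary 0 0

-- ===== PORT B =====
-- B's direct recursion. The `< 0` guard only makes it total: Python B's recursion
-- never terminates on negatives (RecursionError).
def trinaryToDecimal_alt (trinary : Int) : Int :=
  if trinary = 0 then 0
  else if trinary < 0 then 0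
  else PySem.Int.mod trinary 10 + 3 * trinaryToDecimal_alt (PySem.Int.floordiv trinary 10)
termination_by trinary.toNat
decreasing_by
  have he : PySem.Int.floordiv trinary 10 = trinary / 10 :=
    PySem.Int.floordiv_eq_ediv_of_pos (by omega)
  rw [he]; omega

-- ===== PRECONDITION & SPEC =====
def Spec_trinaryToDecimal (trinary : Int) (out : Int) : Prop := out = trinaryToDecimal_alt trinary
instance (trinary : Int) (out : Int) : Decidable (Spec_trinaryToDecimal trinary out) := by unfold Spec_trinaryToDecimal; infer_instance

-- ===== CLAIM =====
def Claim_equal_trinaryToDecimal : Prop := ∀ (trinary : Int), Dom_trinaryToDecimal trinary → Spec_trinaryToDecimal trinary (trinaryToDecimal trinary)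

-- ===== LEMMAS AND PROOFS =====

-- Loop invariant: A's accumulator loop computes decimal + 3^i * (B's value).
lemma pvLoopA_eq : ∀ n (t : Int), t.toNat = n →
    ∀ (d : Int) (i : Nat), pvLoopA t d i = d + 3 ^ i * trinaryToDecimal_alt t := by
  intro n
  induction n using Nat.strong_induction_on with
  | _ n ih =>
    intro t htn d i
    rw [pvLoopA, trinaryToDecimal_alt]
    split
    · simp
    · split
      · simp
      · rename_i h0 hneg
        have he : PySem.Int.floordiv t 10 = t / 10 :=
          PySem.Int.floordiv_eq_ediv_of_pos (by omega)
        have hlt : (PySem.Int.floordiv t 10).toNat < n := by rw [he]; omega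
        rw [ih _ hlt _ rfl]
        simp only [pow_succ]
        ring

-- ===== VERDICT =====
theorem trinaryToDecimal_spec : Claim_equal_trinaryToDecimal := by
  intro t _
  unfold Spec_trinaryToDecimal trinaryToDecimal
  rw [pvLoopA_eq t.toNat t rfl 0 0]
  simp
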